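-- pv_equiv track=rewrite | github.com/ScottDAdams/sentinelai | sentinel-demo/apps/api/verdict_mapping.py | policy_action_to_verdict
-- ===== SOURCE A (Python) =====
-- def policy_action_to_verdict(actions: list) -> str:
--     """
--     Map policy actions to canonical verdict.
--     Priority: BLOCK > REVIEW > REDACT > ALLOW
--
--     Args:
--         actions: List of policy action strings (e.g., ["BLOCK", "REDACT"])
--
--     Returns:
--         Canonical verdict string: "ALLOWED", "REDACTED", "HELD_FOR_REVIEW", or "BLOCKED"
--     """
--     if not actions:
--         return "ALLOWED"
--
--     # Priority: BLOCK > REVIEW > REDACT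
--     if any(action == "BLOCK" for action in actions):
--         return "BLOCKED"
--     elif any(action == "REVIEW" for action in actions):
--         return "HELD_FOR_REVIEW"
--     elif any(action == "REDACT" for action in actions):
--         return "REDACTED"
--     else:
--         return "ALLOWED"
-- ===== SOURCE B (Python) =====
-- _PRIO = {"BLOCK": 3, "REVIEW": 2, "REDACT": 1}
-- _VERDICTS = ["ALLOWED", "REDACTED", "HELD_FOR_REVIEW", "BLOCKED"]
--
--
-- def policy_action_to_verdict(actions: list) -> str:
--     p = 0
--     for a in actions:
--         p = max(p, _PRIO.get(a, 0))
--     return _VERDICTS[p]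
-- ===== Notes on version B (the rewrite author's own statement) =====
-- stated objective: alternative
-- what changed: Replaced the three ordered short-circuit any() scans with a single pass computing the maximum priority (BLOCK=3, REVIEW=2, REDACT=1, other=0) and a table lookup from that maximum to the verdict string.
import Mathlib
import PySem

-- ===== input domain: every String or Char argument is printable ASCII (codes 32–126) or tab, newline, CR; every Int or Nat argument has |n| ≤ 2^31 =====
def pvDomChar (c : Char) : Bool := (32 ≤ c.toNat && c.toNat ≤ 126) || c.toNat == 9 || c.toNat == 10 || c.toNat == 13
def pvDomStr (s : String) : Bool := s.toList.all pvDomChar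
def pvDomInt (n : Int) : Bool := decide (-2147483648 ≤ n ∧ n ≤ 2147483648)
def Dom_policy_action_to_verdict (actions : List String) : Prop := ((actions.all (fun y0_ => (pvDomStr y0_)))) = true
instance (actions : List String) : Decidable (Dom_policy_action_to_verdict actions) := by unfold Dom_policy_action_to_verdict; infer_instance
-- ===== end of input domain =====

-- B replaces A's three ordered any() scans with one max-priority pass plus a table lookup (alternative decomposition, same cost).

-- ===== PORT A =====
def policy_action_to_verdict (actions : List String) : String :=
  if actions.isEmpty then "ALLOWED"
  else if actions.any (fun action => action == "BLOCK") then "BLOCKED"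
  else if actions.any (fun action => action == "REVIEW") then "HELD_FOR_REVIEW"
  else if actions.any (fun action => action == "REDACT") then "REDACTED"
  else "ALLOWED"

-- ===== PORT B =====
-- _PRIO.get(a, 0) on the literal three-entry dict
def pvPrio (a : String) : Nat :=
  if a == "BLOCK" then 3 else if a == "REVIEW" then 2 else if a == "REDACT" then 1 else 0

-- _VERDICTS[p]; the index p is always 0..3 so Python never raises here
def pvVerdicts : List String := ["ALLOWED", "REDACTED", "HELD_FOR_REVIEW", "BLOCKED"]

def policy_action_to_verdict_alt (actions : List String) : String :=
  pvVerdicts.getD (actions.foldl (fun p a => max p (pvPrio a)) 0) "ALLOWED"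

-- ===== PRECONDITION & SPEC =====
def Spec_policy_action_to_verdict (actions : List String) (out : String) : Prop := out = policy_action_to_verdict_alt actions
instance (actions : List String) (out : String) : Decidable (Spec_policy_action_to_verdict actions out) := by unfold Spec_policy_action_to_verdict; infer_instance

-- ===== CLAIM (what is proved, stated in full; the proofs are below) =====
def Claim_equal_policy_action_to_verdict : Prop := ∀ (actions : List String), Dom_policy_action_to_verdict actions → Spec_policy_action_to_verdict actions (policy_action_to_verdict actions)

-- ===== LEMMAS AND PROOFS =====

def pvMaxPrio (l : List String) : Nat := l.foldl (fun p a => max p (pvPrio a)) 0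

theorem pvFoldl_shift (l : List String) (p : Nat) :
    l.foldl (fun p a => max p (pvPrio a)) p = max p (l.foldl (fun p a => max p (pvPrio a)) 0) := by
  induction l generalizing p with
  | nil => simp
  | cons a l ih =>
    simp only [List.foldl_cons]
    rw [ih (max p (pvPrio a)), ih (max 0 (pvPrio a))]
    omega

theorem pvMaxPrio_cons (a : String) (l : List String) :
    pvMaxPrio (a :: l) = max (pvPrio a) (pvMaxPrio l) := by
  unfold pvMaxPrio
  simp only [List.foldl_cons]
  rw [pvFoldl_shift]
  omega

theorem pvPrio_le (a : String) : pvPrio a ≤ 3 := by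
  unfold pvPrio; split_ifs <;> omega

theorem pvMaxPrio_le (l : List String) : pvMaxPrio l ≤ 3 := by
  induction l with
  | nil => simp [pvMaxPrio]
  | cons a l ih => rw [pvMaxPrio_cons]; exact max_le (pvPrio_le a) ih

theorem pvPrio_of_ne3 (a : String) (h : a ≠ "BLOCK") : pvPrio a ≤ 2 := by
  unfold pvPrio
  split_ifs with h1 h2 h3 <;> first | (exact absurd (by simpa using h1) h) | omega

theorem pvPrio_of_ne2 (a : String) (h : a ≠ "BLOCK") (h' : a ≠ "REVIEW") : pvPrio a ≤ 1 := by
  unfold pvPrio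
  split_ifs with h1 h2 h3 <;>
    first
    | (exact absurd (by simpa using h1) h)
    | (exact absurd (by simpa using h2) h')
    | omega

theorem pvPrio_of_ne1 (a : String) (h : a ≠ "BLOCK") (h' : a ≠ "REVIEW") (h'' : a ≠ "REDACT") :
    pvPrio a = 0 := by
  unfold pvPrio
  split_ifs with h1 h2 h3
  · exact absurd (by simpa using h1) h
  · exact absurd (by simpa using h2) h'
  · exact absurd (by simpa using h3) h''
  · rfl

theorem pvMaxPrio_ge3 (l : List String) :
    (3 ≤ pvMaxPrio l) ↔ l.any (fun a => a == "BLOCK") = true := by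
  induction l with
  | nil => simp [pvMaxPrio]
  | cons a l ih =>
    rw [pvMaxPrio_cons, List.any_cons]
    simp only [Bool.or_eq_true, beq_iff_eq]
    by_cases h : a = "BLOCK"
    · have hp : pvPrio a = 3 := by simp [pvPrio, h]
      constructor
      · intro _; exact Or.inl h
      · intro _; omega
    · have hp : pvPrio a ≤ 2 := pvPrio_of_ne3 a h
      have hiff : (3 ≤ max (pvPrio a) (pvMaxPrio l)) ↔ 3 ≤ pvMaxPrio l := by omega
      rw [hiff, ih]
      tauto

theorem pvMaxPrio_ge2 (l : List String) :
    (2 ≤ pvMaxPrio l) ↔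
      (l.any (fun a => a == "BLOCK") = true ∨ l.any (fun a => a == "REVIEW") = true) := by
  induction l with
  | nil => simp [pvMaxPrio]
  | cons a l ih =>
    rw [pvMaxPrio_cons]
    simp only [List.any_cons, Bool.or_eq_true, beq_iff_eq]
    by_cases hb : a = "BLOCK"
    · have hp : pvPrio a = 3 := by simp [pvPrio, hb]
      constructor
      · intro _; exact Or.inl (Or.inl hb)
      · intro _; omega
    · by_cases hr : a = "REVIEW"
      · have hp : pvPrio a = 2 := by simp [pvPrio, hr]
        constructor
        · intro _; exact Or.inr (Or.inl hr)
        · intro _; omega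
      · have hp : pvPrio a ≤ 1 := pvPrio_of_ne2 a hb hr
        have hiff : (2 ≤ max (pvPrio a) (pvMaxPrio l)) ↔ 2 ≤ pvMaxPrio l := by omega
        rw [hiff, ih]
        tauto

theorem pvMaxPrio_ge1 (l : List String) :
    (1 ≤ pvMaxPrio l) ↔
      (l.any (fun a => a == "BLOCK") = true ∨ l.any (fun a => a == "REVIEW") = true ∨
        l.any (fun a => a == "REDACT") = true) := by
  induction l with
  | nil => simp [pvMaxPrio]
  | cons a l ih =>
    rw [pvMaxPrio_cons]
    simp only [List.any_cons, Bool.or_eq_true, beq_iff_eq]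
    by_cases hb : a = "BLOCK"
    · have hp : pvPrio a = 3 := by simp [pvPrio, hb]
      constructor
      · intro _; exact Or.inl (Or.inl hb)
      · intro _; omega
    · by_cases hr : a = "REVIEW"
      · have hp : pvPrio a = 2 := by simp [pvPrio, hr]
        constructor
        · intro _; exact Or.inr (Or.inl (Or.inl hr))
        · intro _; omega
      · by_cases hd : a = "REDACT"
        · have hp : pvPrio a = 1 := by simp [pvPrio, hd]
          constructor
          · intro _; exact Or.inr (Or.inr (Or.inl hd))
          · intro _; omega
        · have hp : pvPrio a = 0 := pvPrio_of_ne1 a hb hr hd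
          have hiff : (1 ≤ max (pvPrio a) (pvMaxPrio l)) ↔ 1 ≤ pvMaxPrio l := by omega
          rw [hiff, ih]
          tauto

-- ===== VERDICT (by name: the statement is the Claim_ definition above) =====
theorem policy_action_to_verdict_spec : Claim_equal_policy_action_to_verdict := by
  intro actions _
  show policy_action_to_verdict actions = policy_action_to_verdict_alt actions
  have hle := pvMaxPrio_le actions
  have h3 := pvMaxPrio_ge3 actions
  have h2 := pvMaxPrio_ge2 actions
  have h1 := pvMaxPrio_ge1 actions
  have hfold : actions.foldl (fun p a => max p (pvPrio a)) 0 = pvMaxPrio actions := rfl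
  cases actions with
  | nil => rfl
  | cons a tl =>
    unfold policy_action_to_verdict policy_action_to_verdict_alt
    rw [hfold]
    simp only [List.isEmpty_cons, Bool.false_eq_true, if_false]
    by_cases hB : (a :: tl).any (fun x => x == "BLOCK") = true
    · have hm : pvMaxPrio (a :: tl) = 3 := le_antisymm hle (h3.mpr hB)
      rw [hm, if_pos hB]; rfl
    · rw [if_neg hB]
      by_cases hV : (a :: tl).any (fun x => x == "REVIEW") = true
      · have hm : pvMaxPrio (a :: tl) = 2 := by
          have hge : 2 ≤ pvMaxPrio (a :: tl) := h2.mpr (Or.inr hV)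
          have hlt : ¬ 3 ≤ pvMaxPrio (a :: tl) := fun h => hB (h3.mp h)
          omega
        rw [hm, if_pos hV]; rfl
      · rw [if_neg hV]
        by_cases hD : (a :: tl).any (fun x => x == "REDACT") = true
        · have hm : pvMaxPrio (a :: tl) = 1 := by
            have hge : 1 ≤ pvMaxPrio (a :: tl) := h1.mpr (Or.inr (Or.inr hD))
            have hn2 : ¬ 2 ≤ pvMaxPrio (a :: tl) := fun h => (h2.mp h).elim hB hV
            omega
          rw [hm, if_pos hD]; rfl
        · rw [if_neg hD]
          have hm : pvMaxPrio (a :: tl) = 0 := by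
            have hn1 : ¬ 1 ≤ pvMaxPrio (a :: tl) := fun h =>
              (h1.mp h).elim hB (fun h' => h'.elim hV hD)
            omega
          rw [hm]; rfl
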